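-- pv_equiv track=rewrite | github.com/east-lee/Algorithm | Programmers/[월간코드챌린지시즌2]3번문제.py | solution
-- ===== SOURCE A (Python) =====
-- def solution(s):
--   answer = []
--
--   for string in s:
--     stack = []
--     cnt = 0
--     for i in range(len(string)):
--       stack.append(string[i])
--       while len(stack) >= 3 and stack[-3:] == ['1', '1', '0']:
--         for _ in range(3):
--           stack.pop()
--         cnt += 1
--
--     answer_str = ''
--     mid_str = ''
--     cnt_1 = 0
--     for i in stack:
--       if i == '0':
--         cnt_1 = 0
--         answer_str += mid_str
--         answer_str += '0'
--         mid_str = ''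
--       else:
--         cnt_1 += 1
--         mid_str += '1'
--       if cnt_1 == 3 and cnt:
--         while cnt:
--           answer_str += '110'
--           cnt -= 1
--         answer_str += mid_str
--         mid_str = ''
--         cnt_1 = 0
--
--     for _ in range(cnt):
--       answer_str += '110'
--     answer_str += mid_str
--     answer.append(answer_str)
--
--   return answer
-- ===== SOURCE B (Python) =====
-- def _one(string):
--     # identical stack reduction; then instead of A's char-by-char rebuild with a
--     # mid_str accumulator, insert the '110' blocks at the computed position p.
--     stack = []
--     cnt = 0
--     for ch in string:
--         stack.append(ch)
--         while stack[-3:] == ['1', '1', '0']: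
--             del stack[-3:]
--             cnt += 1
--     # A rebuilds writing every non-'0' char as '1'; keep that.
--     t = ''.join('0' if c == '0' else '1' for c in stack)
--     # insertion point: start of the first '111' run, else just after the last '0'
--     p = 0
--     for i in range(len(t)):
--         if t[i:i+3] == '111':
--             p = i
--             break
--         if t[i] == '0':
--             p = i + 1
--     return t[:p] + '110' * cnt + t[p:]
--
--
-- def solution(s):
--     return [_one(string) for string in s]
-- ===== Notes on version B (the rewrite author's own statement) =====
-- stated objective: simpler
-- what changed: A's stateful char-by-char rebuild (answer_str/mid_str/cnt_1 accumulators with an in-loop flush) is replaced by one scan that finds the single insertion position for the popped '110' blocks (start of the first '111' run, else just after the last '0') followed by a slice-and-concatenate.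
import Mathlib
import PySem

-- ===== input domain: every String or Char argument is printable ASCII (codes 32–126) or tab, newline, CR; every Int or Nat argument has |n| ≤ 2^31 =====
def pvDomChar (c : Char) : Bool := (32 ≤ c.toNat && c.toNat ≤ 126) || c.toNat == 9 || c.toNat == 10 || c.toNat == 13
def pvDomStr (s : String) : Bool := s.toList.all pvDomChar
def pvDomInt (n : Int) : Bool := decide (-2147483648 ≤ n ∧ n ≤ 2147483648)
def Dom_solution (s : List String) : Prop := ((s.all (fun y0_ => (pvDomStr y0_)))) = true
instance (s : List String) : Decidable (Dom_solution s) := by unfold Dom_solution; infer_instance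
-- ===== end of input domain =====

-- B replaces A's char-by-char rebuild (mid_str/cnt_1 accumulators) by computing the single
-- insertion position of the popped '110' blocks in one scan; same return value as A.

-- '110' written n times (Python's repeated  answer_str += '110'  /  '110' * cnt)
def rep110 : Nat → List Char
  | 0 => []
  | n + 1 => '1' :: '1' :: '0' :: rep110 n

-- ===== PORT A =====
-- The Python stack is stored top-first here (stack[-1] is the head), so
-- "while len(stack) >= 3 and stack[-3:] == ['1','1','0']: pop*3" is the head
-- pattern '0','1','1'; the later "for i in stack" iteration reverses it back.
def redWhileA : List Char → Nat → List Char × Nat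
  | '0' :: '1' :: '1' :: rest, cnt => redWhileA rest (cnt + 1)
  | st, cnt => (st, cnt)

-- one iteration of A's rebuild loop; state = (answer_str, mid_str, cnt_1, cnt)
def rebuildStepA (st : List Char × List Char × Nat × Nat) (c : Char) : List Char × List Char × Nat × Nat :=
  let ans := st.1; let mid := st.2.1; let cnt1 := st.2.2.1; let cnt := st.2.2.2
  let ans' := if c = '0' then ans ++ mid ++ ['0'] else ans
  let mid' := if c = '0' then [] else mid ++ ['1']
  let cnt1' := if c = '0' then 0 else cnt1 + 1
  if cnt1' = 3 ∧ cnt ≠ 0 then (ans' ++ rep110 cnt ++ mid', [], 0, 0)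
  else (ans', mid', cnt1', cnt)

-- A's body for one element of s
def solveA (str : String) : String :=
  let rc := str.toList.foldl (fun (st : List Char × Nat) c => redWhileA (c :: st.1) st.2) ([], 0)
  let fin := rc.1.reverse.foldl rebuildStepA ([], [], 0, rc.2)
  String.ofList (fin.1 ++ rep110 fin.2.2.2 ++ fin.2.1)

def solution (s : List String) : List String :=
  s.foldl (fun ans str => ans ++ [solveA str]) []

-- ===== PORT B =====
-- Source B keeps A's stack reduction; stack stored top-first exactly as in port A
def redWhileB : List Char → Nat → List Char × Nat
  | '0' :: '1' :: '1' :: rest, cnt => redWhileB rest (cnt + 1)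
  | st, cnt => (st, cnt)

-- Source B's insertion-point scan: "for i in range(len(t)): if t[i:i+3] == '111': p = i; break
-- ; if t[i] == '0': p = i + 1"; r is the remaining suffix t[i:], so t[i:i+3] is r.take 3
def altScan : List Char → Nat → Nat → Nat
  | [], _, p => p
  | ch :: rest, i, p =>
      if (ch :: rest).take 3 = ['1', '1', '1'] then i
      else altScan rest (i + 1) (if ch = '0' then i + 1 else p)

-- Source B's _one
def solveB (str : String) : String :=
  let rc := str.toList.foldl (fun (st : List Char × Nat) c => redWhileB (c :: st.1) st.2) ([], 0)
  let t := rc.1.reverse.map (fun c => if c = '0' then '0' else '1')   -- ''.join(...)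
  let p := altScan t 0 0
  String.ofList (t.take p ++ rep110 rc.2 ++ t.drop p)   -- t[:p] + '110'*cnt + t[p:], p ≥ 0

def solution_alt (s : List String) : List String := s.map solveB

-- ===== PRECONDITION & SPEC =====
def Spec_solution (s : List String) (out : List String) : Prop := out = solution_alt s
instance (s : List String) (out : List String) : Decidable (Spec_solution s out) := by unfold Spec_solution; infer_instance

-- ===== CLAIM (what is proved, stated in full; the proofs are below) =====
def Claim_equal_solution : Prop := ∀ (s : List String), Dom_solution s → Spec_solution s (solution s)

-- ===== LEMMAS AND PROOFS =====

theorem redWhileB_eq_A : ∀ (st : List Char) (cnt : Nat), redWhileB st cnt = redWhileA st cnt := by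
  intro st cnt
  fun_induction redWhileB st cnt with
  | case1 rest cnt ih => rw [redWhileA, ih]
  | case2 st cnt h =>
      rw [redWhileA.eq_def]
      split
      · exact (h _ rfl).elim
      · rfl

-- A's rebuild writes '0' for '0' and '1' for every other character
def mB (l : List Char) : List Char := l.map (fun c => if c = '0' then '0' else '1')

def ones (k : Nat) : List Char := List.replicate k '1'

def has111 : List Char → Bool
  | [] => false
  | ch :: rest => if (ch :: rest).take 3 = ['1', '1', '1'] then true else has111 rest

-- the insertion position: start of the first '111' run, else one past the last '0'
def ipos : List Char → Nat
  | [] => 0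
  | ch :: rest =>
      if (ch :: rest).take 3 = ['1', '1', '1'] then 0
      else if ch = '0' then ipos rest + 1
      else if '0' ∈ rest then ipos rest + 1 else 0

def insAt (cnt : Nat) (t : List Char) : List Char :=
  t.take (ipos t) ++ rep110 cnt ++ t.drop (ipos t)

def binaryL (l : List Char) : Prop := ∀ c ∈ l, c = '0' ∨ c = '1'

theorem ipos_of_no0_no111 : ∀ (l : List Char), '0' ∉ l → has111 l = false → ipos l = 0 := by
  intro l h0 h1
  cases l with
  | nil => rfl
  | cons ch rest =>
    rw [has111] at h1
    rw [ipos]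
    split
    · simp_all
    · rw [if_neg (by rintro rfl; exact h0 (List.mem_cons_self))]
      rw [if_neg (fun hm => h0 (List.mem_cons_of_mem _ hm))]

theorem ipos_ones : ∀ (k : Nat), k ≤ 2 → ipos (ones k) = 0 := by
  intro k hk
  interval_cases k <;> decide

theorem insAt_peel0 : ∀ (k : Nat) (v : List Char) (cnt : Nat), k ≤ 2 →
    insAt cnt (ones k ++ '0' :: v) = ones k ++ '0' :: insAt cnt v := by
  intro k v cnt hk
  interval_cases k <;>
    simp [insAt, ones, ipos, List.take_succ_cons, List.drop_succ_cons]

theorem take2_of_ones_has111 : ∀ (l : List Char), binaryL l → '0' ∉ l → has111 l = true →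
    l.take 2 = ['1', '1'] := by
  intro l hb h0 h1
  match l with
  | [] => simp [has111] at h1
  | [c] => simp [has111] at h1
  | c1 :: c2 :: r =>
    have hc1 : c1 = '1' := by
      rcases hb c1 (by simp) with h | h
      · exact absurd (h ▸ List.mem_cons_self) h0
      · exact h
    have hc2 : c2 = '1' := by
      rcases hb c2 (by simp) with h | h
      · exact absurd (h ▸ List.mem_cons_of_mem _ List.mem_cons_self) h0
      · exact h
    simp [hc1, hc2]

theorem altScan_char : ∀ (r : List Char) (i p : Nat), binaryL r →
    altScan r i p = if ('0' ∈ r ∨ has111 r = true) then i + ipos r else p := by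
  intro r
  induction r with
  | nil => intro i p _; simp [altScan, has111]
  | cons ch rest ih =>
    intro i p hb
    have hbrest : binaryL rest := fun c hc => hb c (List.mem_cons_of_mem _ hc)
    rw [altScan]
    by_cases ht : (ch :: rest).take 3 = ['1', '1', '1']
    · simp [ht, has111, ipos]
    · rw [if_neg ht, ih _ _ hbrest]
      by_cases hc : ch = '0'
      · subst hc
        rw [if_pos rfl]
        have hip : ipos ('0' :: rest) = ipos rest + 1 := by rw [ipos, if_neg ht, if_pos rfl]
        rw [if_pos (Or.inl List.mem_cons_self), hip]
        by_cases hcond : ('0' ∈ rest ∨ has111 rest = true)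
        · rw [if_pos hcond]; omega
        · rw [if_neg hcond]
          rw [not_or] at hcond
          rw [ipos_of_no0_no111 rest hcond.1 (by simpa using hcond.2)]
      · rw [if_neg hc]
        have hmem : ('0' ∈ ch :: rest) ↔ '0' ∈ rest := by
          constructor
          · intro h
            rcases List.mem_cons.mp h with h | h
            · exact absurd h.symm hc
            · exact h
          · exact List.mem_cons_of_mem _
        have h111 : has111 (ch :: rest) = has111 rest := by rw [has111, if_neg ht]
        by_cases hcond : ('0' ∈ rest ∨ has111 rest = true)
        · rw [if_pos hcond, if_pos (by rw [hmem, h111]; exact hcond)]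
          rcases hcond with h0r | hhr
          · have hip : ipos (ch :: rest) = ipos rest + 1 := by
              rw [ipos, if_neg ht, if_neg hc, if_pos h0r]
            rw [hip]; omega
          · by_cases h0r : '0' ∈ rest
            · have hip : ipos (ch :: rest) = ipos rest + 1 := by
                rw [ipos, if_neg ht, if_neg hc, if_pos h0r]
              rw [hip]; omega
            · exfalso
              apply ht
              have hch : ch = '1' := by
                rcases hb ch List.mem_cons_self with h | h
                · exact absurd h hc
                · exact h
              have h2 := take2_of_ones_has111 rest hbrest h0r hhr
              calc (ch :: rest).take 3 = ch :: rest.take 2 := by rw [List.take_succ_cons]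
                _ = ['1', '1', '1'] := by rw [hch, h2]
        · rw [if_neg hcond, if_neg (by rw [hmem, h111]; exact hcond)]

-- the rebuild loop followed by A's final  '110'*cnt ++ mid_str  flush
def G (l : List Char) (st : List Char × List Char × Nat × Nat) : List Char :=
  let f := l.foldl rebuildStepA st
  f.1 ++ rep110 f.2.2.2 ++ f.2.1

theorem rebuild_zero : ∀ (l ans mid : List Char) (cnt1 : Nat),
    G l (ans, mid, cnt1, 0) = ans ++ mid ++ mB l := by
  intro l
  induction l with
  | nil => intro ans mid cnt1; simp [G, rep110, mB]
  | cons c rest ih =>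
    intro ans mid cnt1
    show G rest (rebuildStepA (ans, mid, cnt1, 0) c) = ans ++ mid ++ mB (c :: rest)
    by_cases hc : c = '0'
    · subst hc
      have : rebuildStepA (ans, mid, cnt1, 0) '0' = (ans ++ mid ++ ['0'], [], 0, 0) := by
        simp [rebuildStepA]
      rw [this, ih]
      simp [mB]
    · have : rebuildStepA (ans, mid, cnt1, 0) c = (ans, mid ++ ['1'], cnt1 + 1, 0) := by
        simp [rebuildStepA, hc]
      rw [this, ih]
      simp [mB, hc]

theorem rebuild_pos : ∀ (l : List Char) (ans : List Char) (k cnt : Nat), k ≤ 2 → cnt ≠ 0 →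
    G l (ans, ones k, k, cnt) = ans ++ insAt cnt (ones k ++ mB l) := by
  intro l
  induction l with
  | nil =>
    intro ans k cnt hk hcnt
    simp only [G, List.foldl_nil, mB, List.map_nil, List.append_nil, insAt, ipos_ones k hk,
      List.take_zero, List.drop_zero, List.nil_append, List.append_assoc]
  | cons c rest ih =>
    intro ans k cnt hk hcnt
    show G rest (rebuildStepA (ans, ones k, k, cnt) c) = ans ++ insAt cnt (ones k ++ mB (c :: rest))
    by_cases hc : c = '0'
    · subst hc
      have hstep : rebuildStepA (ans, ones k, k, cnt) '0' = (ans ++ ones k ++ ['0'], [], 0, cnt) := by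
        simp [rebuildStepA]
      rw [hstep]
      have hih := ih (ans ++ ones k ++ ['0']) 0 cnt (by omega) hcnt
      simp only [show (ones 0 : List Char) = [] from rfl, List.nil_append] at hih
      rw [hih]
      have hmb : mB ('0' :: rest) = '0' :: mB rest := by simp [mB]
      rw [hmb, insAt_peel0 k (mB rest) cnt hk]
      simp [List.append_assoc]
    · by_cases hk2 : k = 2
      · subst hk2
        have hstep : rebuildStepA (ans, ones 2, 2, cnt) c =
            (ans ++ rep110 cnt ++ (ones 2 ++ ['1']), [], 0, 0) := by
          simp [rebuildStepA, hc, hcnt]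
        rw [hstep, rebuild_zero]
        have hmb : mB (c :: rest) = '1' :: mB rest := by simp [mB, hc]
        rw [hmb]
        have hins : insAt cnt ('1' :: '1' :: '1' :: mB rest) =
            rep110 cnt ++ '1' :: '1' :: '1' :: mB rest := by
          have hip : ipos ('1' :: '1' :: '1' :: mB rest) = 0 := by
            rw [ipos, if_pos (by simp)]
          simp [insAt, hip]
        rw [show (ones 2 ++ '1' :: mB rest : List Char) = '1' :: '1' :: '1' :: mB rest from rfl]
        rw [hins]
        simp [ones]
      · have hstep : rebuildStepA (ans, ones k, k, cnt) c = (ans, ones k ++ ['1'], k + 1, cnt) := by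
          have h3 : k + 1 ≠ 3 := by omega
          simp [rebuildStepA, hc, h3]
        rw [hstep]
        have hones : ones k ++ ['1'] = ones (k + 1) := by
          simp [ones, List.replicate_succ']
        rw [hones, ih ans (k + 1) cnt (by omega) hcnt]
        have : ones (k + 1) ++ mB rest = ones k ++ mB (c :: rest) := by
          simp [ones, List.replicate_succ', mB, hc]
        rw [this]

theorem mB_binary : ∀ (l : List Char), binaryL (mB l) := by
  intro l c hc
  simp only [mB, List.mem_map] at hc
  obtain ⟨a, -, ha⟩ := hc
  by_cases h : a = '0'
  · left; rw [← ha, if_pos h]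
  · right; rw [← ha, if_neg h]

theorem altScan_eq_ipos : ∀ (t : List Char), binaryL t → altScan t 0 0 = ipos t := by
  intro t hb
  rw [altScan_char t 0 0 hb]
  split_ifs with h
  · omega
  · rw [not_or] at h
    rw [ipos_of_no0_no111 t h.1 (by simpa using h.2)]

theorem main_eq : ∀ (stk : List Char) (cnt : Nat),
    G stk ([], [], 0, cnt) =
      (mB stk).take (altScan (mB stk) 0 0) ++ rep110 cnt ++ (mB stk).drop (altScan (mB stk) 0 0) := by
  intro stk cnt
  rw [altScan_eq_ipos (mB stk) (mB_binary stk)]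
  cases cnt with
  | zero =>
    rw [rebuild_zero stk [] [] 0]
    simp [rep110]
  | succ n =>
    have h := rebuild_pos stk [] 0 (n + 1) (by omega) (by omega)
    rw [show (([], [], 0, n + 1) : List Char × List Char × Nat × Nat) = ([], ones 0, 0, n + 1) from rfl, h]
    simp [insAt, ones]

theorem solveA_eq_solveB : ∀ (str : String), solveA str = solveB str := by
  intro str
  have hBA : redWhileB = redWhileA := funext fun st => funext fun cnt => redWhileB_eq_A st cnt
  simp only [solveA, solveB, hBA]
  exact congrArg String.ofList (main_eq _ _)

-- ===== VERDICT (by name: the statement is the Claim_ definition above) =====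
theorem solution_spec : Claim_equal_solution := by
  intro s _
  unfold Spec_solution solution solution_alt
  rw [PySem.List.foldl_append_singleton_eq_map]
  simp only [List.nil_append]
  exact List.map_congr_left fun x _ => solveA_eq_solveB x
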